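-- pv_equiv track=rewrite | github.com/mitchrule/DartsScorer | scorer.py | isValidThrow
-- ===== SOURCE A (Python) =====
-- def isValidThrow(throws):
--     '''
--     Takes throws and returns True or False to
--     whether they are legal throws.
--
--     Example: ['T21', '20', '20'] --> False
--     '''
--
--     valid = True
--     validThrows = []
--
--     for i in range(1, 21):
--         validThrows.append(str(i))
--         validThrows.append('d' + str(i))
--         validThrows.append('t' + str(i))
--
--     validThrows.append('25')
--     validThrows.append('50')
--
--     for throw in throws:
--         if throw.lower() in validThrows:
--             pass
--         else:
--             valid = False
--             break
--
--     return valid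
-- ===== SOURCE B (Python) =====
-- def isValidThrow(throws):
--     '''Structural parse instead of membership in a prebuilt 62-entry table.'''
--     for throw in throws:
--         s = throw.lower()
--         if s in ('25', '50'):
--             continue
--         if s[:1] in ('d', 't'):
--             s = s[1:]
--         if not ((len(s) == 1 and '1' <= s[0] <= '9')
--                 or (len(s) == 2 and ((s[0] == '1' and '0' <= s[1] <= '9')
--                                      or (s[0] == '2' and s[1] == '0')))):
--             return False
--     return True
-- ===== Notes on version B (the rewrite author's own statement) =====
-- stated objective: simpler
-- what changed: B drops A's prebuilt 62-entry lookup table and instead validates each lowered throw by parsing its structure: accept '25'/'50', strip one optional 'd'/'t' prefix, and require the rest to be a canonical numeral 1..20 (one char '1'-'9', or '1'+digit, or '20').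
import Mathlib
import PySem

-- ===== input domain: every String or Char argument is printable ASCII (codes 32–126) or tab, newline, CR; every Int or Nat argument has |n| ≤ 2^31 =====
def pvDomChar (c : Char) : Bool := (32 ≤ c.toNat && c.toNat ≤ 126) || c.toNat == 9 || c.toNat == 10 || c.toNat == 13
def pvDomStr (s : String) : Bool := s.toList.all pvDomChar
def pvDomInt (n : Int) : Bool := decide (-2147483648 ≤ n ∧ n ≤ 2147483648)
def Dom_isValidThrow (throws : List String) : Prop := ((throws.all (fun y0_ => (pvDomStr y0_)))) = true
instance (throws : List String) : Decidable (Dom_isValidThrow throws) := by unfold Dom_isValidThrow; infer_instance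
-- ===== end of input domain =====

-- B validates each throw by parsing its structure ('25'/'50', optional 'd'/'t' prefix, canonical 1..20)
-- instead of testing membership in A's prebuilt 62-entry table; objective: simpler.

-- ===== PORT A =====
-- the validThrows table A builds: str(i), 'd'+str(i), 't'+str(i) for i in range(1,21), then '25','50'
def pvTableA : List String :=
  ((PySem.List.pyRange 1 21 1).foldl
    (fun acc i => ((acc ++ [PySem.Int.toStr i]) ++ ["d" ++ PySem.Int.toStr i]) ++ ["t" ++ PySem.Int.toStr i]) [])
   ++ ["25"] ++ ["50"]

-- the for-loop over throws: valid = False and break on the first throw whose .lower() is not in the table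
def pvLoopA (table : List String) : List String → Bool
  | [] => true
  | t :: ts => if (PySem.Str.lower t) ∈ table then pvLoopA table ts else false

def isValidThrow (throws : List String) : Bool := pvLoopA pvTableA throws

-- ===== PORT B =====
-- Source B's "if s[:1] in ('d','t'): s = s[1:]" on the lowered char list
def stripDT : List Char → List Char
  | [] => []
  | c :: rest => if c = 'd' ∨ c = 't' then rest else c :: rest

-- Source B's final test: one char '1'..'9', or two chars '1'+digit / '20'
def digitsOK : List Char → Bool
  | [c] => decide ('1' ≤ c ∧ c ≤ '9')
  | [c1, c2] => decide ((c1 = '1' ∧ '0' ≤ c2 ∧ c2 ≤ '9') ∨ (c1 = '2' ∧ c2 = '0'))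
  | _ => false

-- per-throw check on the lowered string: '25'/'50' accepted outright, else strip 'd'/'t' and parse
def pvCore (cs : List Char) : Bool :=
  if cs = ['2','5'] ∨ cs = ['5','0'] then true else digitsOK (stripDT cs)

def pvCheckThrow (throw : String) : Bool := pvCore (PySem.Str.lower throw).toList

def isValidThrow_alt : List String → Bool
  | [] => true
  | t :: ts => pvCheckThrow t && isValidThrow_alt ts

-- ===== PRECONDITION & SPEC =====
def Spec_isValidThrow (throws : List String) (out : Bool) : Prop := out = isValidThrow_alt throws
instance (throws : List String) (out : Bool) : Decidable (Spec_isValidThrow throws out) := by unfold Spec_isValidThrow; infer_instance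

-- ===== CLAIM (what is proved, stated in full; the proofs are below) =====
def Claim_equal_isValidThrow : Prop := ∀ (throws : List String), Dom_isValidThrow throws → Spec_isValidThrow throws (isValidThrow throws)

-- ===== LEMMAS AND PROOFS =====
-- A's table, as the char lists of its 62 entries
def charTable : List (List Char) :=
  [['1'],['d','1'],['t','1'],['2'],['d','2'],['t','2'],['3'],['d','3'],['t','3'],
   ['4'],['d','4'],['t','4'],['5'],['d','5'],['t','5'],['6'],['d','6'],['t','6'],
   ['7'],['d','7'],['t','7'],['8'],['d','8'],['t','8'],['9'],['d','9'],['t','9'],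
   ['1','0'],['d','1','0'],['t','1','0'],['1','1'],['d','1','1'],['t','1','1'],
   ['1','2'],['d','1','2'],['t','1','2'],['1','3'],['d','1','3'],['t','1','3'],
   ['1','4'],['d','1','4'],['t','1','4'],['1','5'],['d','1','5'],['t','1','5'],
   ['1','6'],['d','1','6'],['t','1','6'],['1','7'],['d','1','7'],['t','1','7'],
   ['1','8'],['d','1','8'],['t','1','8'],['1','9'],['d','1','9'],['t','1','9'],
   ['2','0'],['d','2','0'],['t','2','0'],['2','5'],['5','0']]

lemma pv_map_toList : pvTableA.map String.toList = charTable := by decide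

lemma pv_mem_iff (s : String) : s ∈ pvTableA ↔ s.toList ∈ charTable := by
  rw [← pv_map_toList]
  exact (List.mem_map_of_injective (fun x y h => String.ext_iff.mpr h)).symm

lemma pv_char_le_iff (a b : Char) : (a ≤ b) ↔ a.toNat ≤ b.toNat := by
  rw [Char.le_def, UInt32.le_iff_toNat_le]; rfl

lemma pv_char_eq_iff (a b : Char) : (a = b) ↔ a.toNat = b.toNat :=
  ⟨fun h => h ▸ rfl, fun h => Char.ext (UInt32.toNat_inj.mp h)⟩

lemma digit_range (b : Char) :
    (b = '1' ∨ b = '2' ∨ b = '3' ∨ b = '4' ∨ b = '5' ∨ b = '6' ∨ b = '7' ∨ b = '8' ∨ b = '9')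
      ↔ ('1' ≤ b ∧ b ≤ '9') := by
  simp only [pv_char_eq_iff, pv_char_le_iff,
    show ('1':Char).toNat = 49 from rfl,
    show ('2':Char).toNat = 50 from rfl, show ('3':Char).toNat = 51 from rfl,
    show ('4':Char).toNat = 52 from rfl, show ('5':Char).toNat = 53 from rfl,
    show ('6':Char).toNat = 54 from rfl, show ('7':Char).toNat = 55 from rfl,
    show ('8':Char).toNat = 56 from rfl, show ('9':Char).toNat = 57 from rfl]
  omega

lemma case1 (a : Char) : (([a] : List Char) ∈ charTable) ↔ pvCore [a] = true := by
  by_cases ha : a = 'd' ∨ a = 't'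
  · rcases ha with rfl | rfl <;> simp [charTable, pvCore, stripDT, digitsOK]
  · rw [pvCore, if_neg (by simp), stripDT, if_neg ha]
    simp [charTable, digitsOK]
    exact digit_range a

lemma case2 (a b : Char) : (([a,b] : List Char) ∈ charTable) ↔ pvCore [a,b] = true := by
  by_cases h1 : ([a,b] : List Char) = ['2','5'] ∨ ([a,b] : List Char) = ['5','0']
  · rcases h1 with h | h <;> (simp only [List.cons.injEq, and_true] at h; obtain ⟨rfl, rfl⟩ := h) <;> decide
  · rw [pvCore, if_neg h1]
    by_cases h2 : a = 'd' ∨ a = 't'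
    · rcases h2 with rfl | rfl <;> (clear h1) <;>
        simp [charTable, stripDT, digitsOK] <;> exact digit_range b
    · rw [stripDT, if_neg h2]
      simp only [List.cons.injEq, and_true, not_or] at h1
      simp only [not_or] at h2
      simp [charTable, digitsOK]
      simp only [pv_char_eq_iff, pv_char_le_iff,
        show ('0':Char).toNat = 48 from rfl, show ('1':Char).toNat = 49 from rfl,
        show ('2':Char).toNat = 50 from rfl, show ('3':Char).toNat = 51 from rfl,
        show ('4':Char).toNat = 52 from rfl, show ('5':Char).toNat = 53 from rfl,
        show ('6':Char).toNat = 54 from rfl, show ('7':Char).toNat = 55 from rfl,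
        show ('8':Char).toNat = 56 from rfl, show ('9':Char).toNat = 57 from rfl,
        show ('d':Char).toNat = 100 from rfl, show ('t':Char).toNat = 116 from rfl] at *
      omega

lemma case3 (a b c : Char) : (([a,b,c] : List Char) ∈ charTable) ↔ pvCore [a,b,c] = true := by
  rw [pvCore, if_neg (by simp)]
  by_cases h2 : a = 'd' ∨ a = 't'
  · rcases h2 with rfl | rfl <;>
      simp [charTable, stripDT, digitsOK] <;>
      simp only [pv_char_eq_iff, pv_char_le_iff,
        show ('0':Char).toNat = 48 from rfl, show ('1':Char).toNat = 49 from rfl,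
        show ('2':Char).toNat = 50 from rfl, show ('3':Char).toNat = 51 from rfl,
        show ('4':Char).toNat = 52 from rfl, show ('5':Char).toNat = 53 from rfl,
        show ('6':Char).toNat = 54 from rfl, show ('7':Char).toNat = 55 from rfl,
        show ('8':Char).toNat = 56 from rfl, show ('9':Char).toNat = 57 from rfl] at * <;>
      omega
  · rw [stripDT, if_neg h2]
    simp only [not_or] at h2
    obtain ⟨hd, ht⟩ := h2
    simp [charTable, digitsOK]
    simp only [pv_char_eq_iff,
      show ('d':Char).toNat = 100 from rfl, show ('t':Char).toNat = 116 from rfl] at *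
    omega

-- membership in A's table coincides with B's structural parse, for every char list
lemma pv_key' (cs : List Char) : (cs ∈ charTable) ↔ pvCore cs = true := by
  rcases cs with _ | ⟨a, _ | ⟨b, _ | ⟨c, _ | ⟨d, tl⟩⟩⟩⟩
  · decide
  · exact case1 a
  · exact case2 a b
  · exact case3 a b c
  · rw [pvCore, if_neg (by simp), stripDT]
    split_ifs <;> simp [charTable, digitsOK]

lemma pv_key (s : String) : (decide (s ∈ pvTableA)) = pvCore s.toList := by
  rw [Bool.eq_iff_iff, decide_eq_true_eq, pv_mem_iff]
  exact pv_key' s.toList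

lemma pv_loop_eq (ts : List String) : pvLoopA pvTableA ts = isValidThrow_alt ts := by
  induction ts with
  | nil => rfl
  | cons t ts ih =>
    show (if (PySem.Str.lower t) ∈ pvTableA then pvLoopA pvTableA ts else false)
        = (pvCheckThrow t && isValidThrow_alt ts)
    rw [show pvCheckThrow t = decide ((PySem.Str.lower t) ∈ pvTableA) from (pv_key _).symm, ih]
    by_cases hm : (PySem.Str.lower t) ∈ pvTableA <;> simp [hm]

-- ===== VERDICT (by name: the statement is the Claim_ definition above) =====
theorem isValidThrow_spec : Claim_equal_isValidThrow := by
  intro throws _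
  unfold Spec_isValidThrow isValidThrow
  exact pv_loop_eq throws
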